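-- pv_equiv track=rewrite | github.com/appinha/google-foobar | Level_2-1/solution.py | stingy
-- ===== SOURCE A (Python) =====
-- def stingy(total_lambs):
--   if total_lambs == 1:
--     return 1
--   if total_lambs == 2:
--     return 2
--   lambs_count = [1, 1]
--   while True:
--     lambs_count.append(lambs_count[-1] + lambs_count[-2])
--     if sum(lambs_count) > total_lambs:
--       break
--   return len(lambs_count) - 1
-- ===== SOURCE B (Python) =====
-- def stingy(total_lambs):
--     if total_lambs == 1:
--         return 1
--     # Sum of the first n Fibonacci numbers is F(n+2)-1, so A's list/sum test
--     # collapses to a two-variable Fibonacci loop with no list and no sum().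
--     count, a, b = 2, 3, 5
--     while b - 1 <= total_lambs:
--         count, a, b = count + 1, b, a + b
--     return count
-- ===== Notes on version B (the rewrite author's own statement) =====
-- stated objective: alternative
-- what changed: Uses the identity sum(F_1..F_n) = F(n+2)-1 to replace A's growing list with append/negative indexing/sum() by a two-scalar Fibonacci loop and a counter; no list is ever built.
import Mathlib
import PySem

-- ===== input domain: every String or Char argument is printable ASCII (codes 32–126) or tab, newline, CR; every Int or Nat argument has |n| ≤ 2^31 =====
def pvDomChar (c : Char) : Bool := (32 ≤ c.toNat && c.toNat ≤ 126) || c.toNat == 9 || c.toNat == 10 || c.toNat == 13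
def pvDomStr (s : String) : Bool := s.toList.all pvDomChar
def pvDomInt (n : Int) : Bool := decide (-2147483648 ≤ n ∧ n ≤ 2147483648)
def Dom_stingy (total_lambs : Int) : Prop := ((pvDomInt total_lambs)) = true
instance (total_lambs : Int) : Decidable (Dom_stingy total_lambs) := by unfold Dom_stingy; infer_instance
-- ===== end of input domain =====

-- B replaces A's growing list + sum() with a two-variable Fibonacci loop, using
-- sum of first n Fibonaccis = F(n+2)-1 (objective: alternative decomposition).

-- ===== PORT A =====
-- helper facts the ports cite by name (kept above the ports because the ports'
-- own well-formedness and termination proofs use them)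
theorem stingy_getD_mem (l : List Int) (i d : Int) (h1 : -(l.length:Int) ≤ i)
    (h2 : i < (l.length:Int)) : PySem.List.pyGetD l i d ∈ l :=
  PySem.List.pyGetD_mem l d ⟨h1, h2⟩

theorem stingy_len2 (l : List Int) (hlen : 2 ≤ l.length) : (2:Int) ≤ (l.length:Int) := by
  exact_mod_cast hlen

theorem stingy_mem_neg1 (l : List Int) (hlen : 2 ≤ l.length) :
    PySem.List.pyGetD l (-1) 0 ∈ l :=
  stingy_getD_mem l (-1) 0
    (neg_le_neg (le_trans (by norm_num) (stingy_len2 l hlen)))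
    (lt_of_lt_of_le (by norm_num) (stingy_len2 l hlen))

theorem stingy_mem_neg2 (l : List Int) (hlen : 2 ≤ l.length) :
    PySem.List.pyGetD l (-2) 0 ∈ l :=
  stingy_getD_mem l (-2) 0
    (neg_le_neg (stingy_len2 l hlen))
    (lt_of_lt_of_le (by norm_num) (stingy_len2 l hlen))

theorem stingy_pos_step (l : List Int) (hpos : ∀ x ∈ l, (1:Int) ≤ x) (hlen : 2 ≤ l.length) :
    ∀ x ∈ l ++ [PySem.List.pyGetD l (-1) 0 + PySem.List.pyGetD l (-2) 0], (1:Int) ≤ x := by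
  intro x hx
  rcases List.mem_append.1 hx with h | h
  · exact hpos x h
  · rw [List.mem_singleton.1 h]
    exact le_trans (hpos _ (stingy_mem_neg1 l hlen))
      (le_add_of_nonneg_right (le_trans zero_le_one (hpos _ (stingy_mem_neg2 l hlen))))

theorem stingy_len_step (l : List Int) (v : Int) (hlen : 2 ≤ l.length) :
    2 ≤ (l ++ [v]).length := by
  rw [List.length_append]
  exact Nat.le_succ_of_le hlen

theorem stingy_dec_step (total : Int) (l : List Int) (hpos : ∀ x ∈ l, (1:Int) ≤ x)
    (hlen : 2 ≤ l.length)
    (hc : ¬ (l ++ [PySem.List.pyGetD l (-1) 0 + PySem.List.pyGetD l (-2) 0]).sum > total) :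
    (total + 1 - (l ++ [PySem.List.pyGetD l (-1) 0 + PySem.List.pyGetD l (-2) 0]).sum).toNat
      < (total + 1 - l.sum).toNat := by
  rw [List.sum_append, List.sum_cons, List.sum_nil, add_zero] at hc ⊢
  have hg : (2:Int) ≤ PySem.List.pyGetD l (-1) 0 + PySem.List.pyGetD l (-2) 0 :=
    add_le_add (hpos _ (stingy_mem_neg1 l hlen)) (hpos _ (stingy_mem_neg2 l hlen))
  have hst : l.sum + 2 ≤ total := le_trans (add_le_add le_rfl hg) (not_lt.1 hc)
  have h1 : l.sum < total + 1 :=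
    lt_of_lt_of_le (lt_add_of_pos_right l.sum two_pos)
      (le_trans hst (le_add_of_nonneg_right zero_le_one))
  refine (Int.toNat_lt_toNat (sub_pos.2 h1)).2 ?_
  exact sub_lt_sub_left
    (lt_add_of_pos_right l.sum (lt_of_lt_of_le two_pos hg)) (total + 1)

theorem stingy_init_pos : ∀ x ∈ ([1, 1] : List Int), (1:Int) ≤ x := by decide
theorem stingy_init_len : 2 ≤ ([1, 1] : List Int).length := by decide

-- A's `while True: append; if sum > total: break` loop; the list elements are all ≥ 1
-- and the length is ≥ 2 (invariants carried as hypotheses), so the last-two-element indexing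
-- never raises (pyGetD with default 0 is exact here) and the sum strictly grows,
-- which gives termination.
def stingyLoop (total : Int) (l : List Int)
    (hpos : ∀ x ∈ l, (1:Int) ≤ x) (hlen : 2 ≤ l.length) : Int :=
  -- lambs_count.append(lambs_count[-1] + lambs_count[-2])
  let l' := l ++ [PySem.List.pyGetD l (-1) 0 + PySem.List.pyGetD l (-2) 0]
  if h : l'.sum > total then (l'.length : Int) - 1
  else
    stingyLoop total l' (stingy_pos_step l hpos hlen) (stingy_len_step l _ hlen)
termination_by (total + 1 - l.sum).toNat
decreasing_by exact stingy_dec_step total l hpos hlen h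

def stingy (total_lambs : Int) : Int :=
  if total_lambs = 1 then 1
  else if total_lambs = 2 then 2
  else stingyLoop total_lambs [1, 1] stingy_init_pos stingy_init_len

-- ===== PORT B =====
-- invariant/termination steps for B's loop, cited by name
theorem stingyAlt_hab_step {a b : Int} (h : 1 ≤ a ∧ a ≤ b) : 1 ≤ b ∧ b ≤ a + b :=
  ⟨le_trans h.1 h.2, le_add_of_nonneg_left (le_trans zero_le_one h.1)⟩

theorem stingyAlt_dec_step {total a b : Int} (hab : 1 ≤ a ∧ a ≤ b) (h : b - 1 ≤ total) :
    (total + 2 - (a + b)).toNat < (total + 2 - b).toNat := by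
  have hb : b ≤ total + 1 := by
    have h2 : b - 1 + 1 ≤ total + 1 := add_le_add h le_rfl
    rwa [sub_add_cancel] at h2
  have h0 : (0:Int) < total + 2 - b :=
    sub_pos.2 (lt_of_le_of_lt hb (by norm_num))
  refine (Int.toNat_lt_toNat h0).2 ?_
  exact sub_lt_sub_left (lt_add_of_pos_left b (lt_of_lt_of_le one_pos hab.1)) (total + 2)

-- B's while loop; 1 ≤ a ≤ b carried as a hypothesis for termination (b strictly
-- grows while b - 1 ≤ total).
def stingyAltLoop (total count a b : Int) (hab : 1 ≤ a ∧ a ≤ b) : Int :=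
  if h : b - 1 ≤ total then
    stingyAltLoop total (count + 1) b (a + b) (stingyAlt_hab_step hab)
  else count
termination_by (total + 2 - b).toNat
decreasing_by exact stingyAlt_dec_step hab h

def stingy_alt (total_lambs : Int) : Int :=
  if total_lambs = 1 then 1
  else stingyAltLoop total_lambs 2 3 5 ⟨by norm_num, by norm_num⟩

-- ===== PRECONDITION & SPEC =====
def Spec_stingy (total_lambs : Int) (out : Int) : Prop := out = stingy_alt total_lambs
instance (total_lambs : Int) (out : Int) : Decidable (Spec_stingy total_lambs out) := by unfold Spec_stingy; infer_instance

-- ===== CLAIM (what is proved, stated in full; the proofs are below) =====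
def Claim_equal_stingy : Prop := ∀ (total_lambs : Int), Dom_stingy total_lambs → Spec_stingy total_lambs (stingy total_lambs)

-- ===== LEMMAS AND PROOFS =====

-- Fibonacci: F 1 = F 2 = 1
def F : Nat → Int
  | 0 => 0
  | 1 => 1
  | n + 2 => F n + F (n + 1)

-- the list A has built once it reaches length n: [F 1, …, F n]
def fibList (n : Nat) : List Int := (List.range n).map (fun i => F (i + 1))

theorem F_pos : ∀ n, 1 ≤ F (n + 1) := by
  intro n
  induction n using Nat.strong_induction_on with
  | _ n ih =>
    match n with
    | 0 => simp [F]
    | 1 => simp [F]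
    | n + 2 =>
      have h1 : 1 ≤ F (n + 2) := ih (n + 1) (by omega)
      have h0 : 0 ≤ F (n + 1) := by
        match n with
        | 0 => simp [F]
        | m + 1 => exact le_trans (by norm_num) (ih (m + 1) (by omega))
      show 1 ≤ F (n + 1) + F (n + 2)
      omega

theorem F_step (n : Nat) : F (n + 2) = F n + F (n + 1) := rfl

theorem fibList_succ (n : Nat) : fibList (n + 1) = fibList n ++ [F (n + 1)] := by
  simp [fibList, List.range_succ]

theorem fibList_length (n : Nat) : (fibList n).length = n := by simp [fibList]

theorem fibList_sum (n : Nat) : (fibList n).sum = F (n + 2) - 1 := by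
  induction n with
  | zero => simp [fibList, F]
  | succ n ih =>
    show (fibList (n + 1)).sum = F (n + 3) - 1
    rw [fibList_succ]
    simp only [List.sum_append, List.sum_cons, List.sum_nil, ih]
    have h3 : F (n + 3) = F (n + 1) + F (n + 2) := F_step (n + 1)
    omega

theorem fibList_pos (n : Nat) : ∀ x ∈ fibList n, (1:Int) ≤ x := by
  intro x hx
  simp [fibList] at hx
  obtain ⟨i, _, rfl⟩ := hx
  exact F_pos i

theorem fibList_last1 (n : Nat) (h : 2 ≤ n) :
    PySem.List.pyGetD (fibList n) (-1) 0 = F n := by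
  rw [PySem.List.pyGetD_neg_ofNat _ 1 _ (by omega) (by simp [fibList_length]; omega)]
  simp only [fibList_length]
  simp [fibList]
  congr 1; omega

theorem fibList_last2 (n : Nat) (h : 2 ≤ n) :
    PySem.List.pyGetD (fibList n) (-2) 0 = F (n - 1) := by
  rw [PySem.List.pyGetD_neg_ofNat _ 2 _ (by omega) (by simp [fibList_length]; omega)]
  simp only [fibList_length]
  simp [fibList]
  congr 1; omega

-- stingyAltLoop only depends on the values of its arguments (proof irrelevance)
theorem altLoop_congr {total c c' a a' b b' : Int} {h : 1 ≤ a ∧ a ≤ b} {h' : 1 ≤ a' ∧ a' ≤ b'}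
    (hc : c = c') (ha : a = a') (hb : b = b') :
    stingyAltLoop total c a b h = stingyAltLoop total c' a' b' h' := by
  subst hc; subst ha; subst hb; rfl

-- main correspondence: A's list loop at fibList n equals B's pair loop at
-- (count, a, b) = (n, F (n+2), F (n+3))
theorem loop_eq (total : Int) :
    ∀ m n (_hn : 2 ≤ n), (total + 2 - F (n + 3)).toNat = m →
    ∀ hpos hlen hab,
    stingyLoop total (fibList n) hpos hlen
      = stingyAltLoop total (n : Int) (F (n + 2)) (F (n + 3)) hab := by
  intro m
  induction m using Nat.strong_induction_on with
  | _ m ih =>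
    intro n hn hm hpos hlen hab
    rw [stingyLoop, stingyAltLoop]
    have happ : fibList n ++ [PySem.List.pyGetD (fibList n) (-1) 0 + PySem.List.pyGetD (fibList n) (-2) 0]
        = fibList (n + 1) := by
      rw [fibList_last1 n hn, fibList_last2 n hn, fibList_succ]
      have hx : F (n + 1) = F (n - 1) + F n := by
        have h1 : n - 1 + 2 = n + 1 := by omega
        have h2 : F (n - 1 + 2) = F (n - 1) + F (n - 1 + 1) := F_step (n - 1)
        rw [show n - 1 + 1 = n by omega] at h2
        rw [← h1, h2]
      rw [hx, Int.add_comm (F n) (F (n - 1))]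
    simp only [happ]
    have hsum : (fibList (n + 1)).sum = F (n + 3) - 1 := by
      have := fibList_sum (n + 1); omega
    have hlen1 : ((fibList (n + 1)).length : Int) = (n : Int) + 1 := by
      simp [fibList_length]
    by_cases hc : F (n + 3) - 1 ≤ total
    · rw [dif_neg (by omega), dif_pos hc]
      have h4 : F (n + 4) = F (n + 2) + F (n + 3) := F_step (n + 2)
      have hp2 := F_pos (n + 1)
      have hp3 := F_pos (n + 2)
      have hrec := ih (total + 2 - F (n + 4)).toNat (by omega)
        (n + 1) (by omega) (by have : F (n + 1 + 3) = F (n + 4) := rfl; omega)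
        (fibList_pos (n + 1))
        (by simp [fibList_length]; omega)
        (by have : F (n + 1 + 2) = F (n + 3) := rfl
            have : F (n + 1 + 3) = F (n + 4) := rfl
            omega)
      rw [hrec]
      exact altLoop_congr (by push_cast; ring) rfl
        (by have e3 : F (n + 1 + 3) = F (n + 4) := rfl; omega)
    · rw [dif_pos (by omega), dif_neg hc]
      omega

theorem stingy_eq (total : Int) : stingy total = stingy_alt total := by
  unfold stingy stingy_alt
  by_cases h1 : total = 1
  · simp [h1]
  by_cases h2 : total = 2
  · rw [if_neg h1, if_pos h2, if_neg h1, stingyAltLoop]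
    norm_num [h2]
  rw [if_neg h1, if_neg h2, if_neg h1]
  have h5 : F 5 = 5 := by decide
  have h4 : F 4 = 3 := by decide
  rw [show (stingyLoop total [1,1] (by intro x hx; simp at hx; omega) (by simp))
      = stingyLoop total (fibList 2) (by intro x hx; exact fibList_pos 2 x hx)
          (by simp [fibList_length]) from by congr 1]
  exact (loop_eq total (total + 2 - F 5).toNat 2 (by omega) rfl _ _ (by decide)).trans
    (altLoop_congr (by norm_num) (by rw [show F (2+2) = F 4 from rfl, h4])
      (by rw [show F (2+3) = F 5 from rfl, h5]))

-- ===== VERDICT (by name: the statement is the Claim_ definition above) =====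
theorem stingy_spec : Claim_equal_stingy := by
  intro total _
  show stingy total = stingy_alt total
  exact stingy_eq total
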